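-- pv_equiv track=rewrite | github.com/buddhashrestha/videoindexer | utils.py | list_anding
-- ===== SOURCE A (Python) =====
-- def list_anding(bitmap_list):
--     and_result = bitmap_list[0]
--     i = 1
--     while True:
--         and_result = and_result & bitmap_list[i]
--         i = i + 1
--         if i == len(bitmap_list):
--             break
--     max_len = max([len(bin(i)[2:]) for i in bitmap_list])
--     # write comment for this theeesss logic////
--     offsets = list(find_offsets(and_result))[::-1]
--     offsets = [max_len - item for item in offsets]
--     return offsets
--
-- def find_offsets(haystack):
--     """
--     Find the start of all (possibly-overlapping) instances of needle in haystack
--     """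
--     offs = -1
--     while True:
--         offs = offs + 1
--         if not haystack:
--             break
--         if haystack & 1:
--             yield offs
--         haystack = haystack >> 1
-- ===== SOURCE B (Python) =====
-- def list_anding(bitmap_list):
--     and_result = bitmap_list[0]
--     for x in bitmap_list[1:]:
--         and_result &= x
--     max_len = max(len(bin(x)[2:]) for x in bitmap_list)
--     s = bin(and_result)[2:].zfill(max_len)
--     return [i + 1 for i, ch in enumerate(s) if ch == '1']
-- ===== Notes on version B (the rewrite author's own statement) =====
-- stated objective: simpler
-- what changed: B folds the AND over the tail instead of an index-and-break while loop, and extracts the set-bit columns by scanning the zero-padded binary string left-to-right instead of generating LSB-first bit offsets, reversing them and subtracting from max_len.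
import Mathlib
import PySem

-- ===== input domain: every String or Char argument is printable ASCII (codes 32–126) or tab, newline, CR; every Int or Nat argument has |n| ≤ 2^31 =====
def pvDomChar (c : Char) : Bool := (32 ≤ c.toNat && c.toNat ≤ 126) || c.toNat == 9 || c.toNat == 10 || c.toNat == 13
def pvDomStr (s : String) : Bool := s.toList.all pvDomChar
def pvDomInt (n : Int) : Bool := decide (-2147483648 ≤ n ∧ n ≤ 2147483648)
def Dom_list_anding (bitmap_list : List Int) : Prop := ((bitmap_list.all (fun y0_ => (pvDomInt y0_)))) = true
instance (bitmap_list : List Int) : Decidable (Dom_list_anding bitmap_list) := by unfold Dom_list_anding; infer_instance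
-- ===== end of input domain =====

-- B replaces A's index/break AND-loop by a fold over the tail and A's LSB-first
-- bit-offset generator + reverse + subtract-from-max_len by a single left-to-right
-- scan of the zero-padded binary string (objective: simpler).

-- ===== PORT A =====

-- digits of bin(n) (MSB first) for n : Nat, [] for 0; shared helper for the builtin bin()
def natBinAuxF : Nat → Nat → List Char
  | _, 0 => []
  | n, fuel+1 => if n = 0 then [] else natBinAuxF (n/2) fuel ++ [if n % 2 = 1 then '1' else '0']
def natBinAux (n : Nat) : List Char := natBinAuxF n n

-- Python bin(n)[2:] as a char list ('-0b101'[2:] = 'b101' for negative n)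
def binStr (n : Int) : List Char :=
  if n < 0 then 'b' :: natBinAux (-n).toNat
  else if n = 0 then ['0'] else natBinAux n.toNat

-- A's while-loop: and_result &= bitmap_list[i]; i += 1; break when i == len (fuel = len)
def andLoopA (xs : List Int) : Int → Nat → Nat → Int
  | acc, _, 0 => acc
  | acc, i, fuel+1 =>
    match PySem.List.pyGet? xs (i : Int) with
    | none => acc    -- IndexError (outside Pre_)
    | some v =>
      let acc2 := PySem.Int.band acc v
      if i + 1 = xs.length then acc2 else andLoopA xs acc2 (i+1) fuel

-- A's find_offsets generator, fueled (the loop halves haystack until 0; diverges for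
-- negative haystack in Python — such inputs are outside Pre_)
def findOffsetsA : Int → Int → Nat → List Int
  | _, _, 0 => []
  | h, offs, fuel+1 =>
    let o := offs + 1
    if h = 0 then []
    else (if PySem.Int.band h 1 = 1 then [o] else []) ++ findOffsetsA (h >>> (1:Nat)) o fuel

def list_anding (bitmap_list : List Int) : List Int :=
  match PySem.List.pyGet? bitmap_list 0 with
  | none => []    -- IndexError on [] (outside Pre_)
  | some first =>
    let and_result := andLoopA bitmap_list first 1 bitmap_list.length
    match PySem.List.max? (bitmap_list.map (fun i => ((binStr i).length : Int))) (fun y => y) with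
    | none => []  -- unreachable: bitmap_list ≠ [] under Pre_
    | some max_len =>
      let offsets := (findOffsetsA and_result (-1) (and_result.natAbs + 1)).reverse
      offsets.map (fun item => max_len - item)

-- ===== PORT B =====

def list_anding_alt (bitmap_list : List Int) : List Int :=
  match bitmap_list with
  | [] => []    -- IndexError on [] (outside Pre_)
  | first :: rest =>
    let and_result := rest.foldl PySem.Int.band first
    match PySem.List.max? (bitmap_list.map (fun x => ((binStr x).length : Int))) (fun y => y) with
    | none => []  -- unreachable: bitmap_list ≠ []
    | some max_len =>
      let s := List.replicate (max_len - ((binStr and_result).length : Int)).toNat '0' ++ binStr and_result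
      (PySem.List.enumerate s).filterMap (fun p => if p.2 = '1' then some (p.1 + 1) else none)

-- ===== PRECONDITION & SPEC =====
-- Pre_ excludes only inputs on which the Python A does not return: lists of length < 2
-- (IndexError at bitmap_list[1]) and lists whose elements are all negative (the
-- find_offsets loop never terminates on a negative AND-result).
def Pre_list_anding (bitmap_list : List Int) : Prop :=
  2 ≤ bitmap_list.length ∧ ∃ x ∈ bitmap_list, 0 ≤ x
instance (bitmap_list : List Int) : Decidable (Pre_list_anding bitmap_list) := by
  unfold Pre_list_anding; infer_instance

def pvWitness_list_anding : List Int := [5, 7]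

def Spec_list_anding (bitmap_list : List Int) (out : List Int) : Prop := out = list_anding_alt bitmap_list
instance (bitmap_list : List Int) (out : List Int) : Decidable (Spec_list_anding bitmap_list out) := by unfold Spec_list_anding; infer_instance

-- ===== CLAIM (what is proved, stated in full; the proofs are below) =====
def Claim_equal_list_anding : Prop := ∀ (bitmap_list : List Int), Dom_list_anding bitmap_list → Pre_list_anding bitmap_list → Spec_list_anding bitmap_list (list_anding bitmap_list)

-- ===== LEMMAS AND PROOFS =====

-- ascending 1-bit positions of a Nat (proof-side canonical form)
def ascBits : Nat → List Nat
  | 0 => []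
  | n+1 => (if (n+1) % 2 = 1 then [0] else []) ++ (ascBits ((n+1)/2)).map (· + 1)

-- recursive form of B's enumerate+filter extraction
def extC : List Char → Int → List Int
  | [], _ => []
  | c :: t, o => (if c = '1' then [o + 1] else []) ++ extC t (o + 1)

theorem band_le_right (a b : Int) (hb : 0 ≤ b) :
    0 ≤ PySem.Int.band a b ∧ PySem.Int.band a b ≤ b := by
  unfold PySem.Int.band
  have hand : a.toNat &&& b.toNat ≤ b.toNat := Nat.and_le_right
  split_ifs <;> omega

theorem band_le_left (a b : Int) (ha : 0 ≤ a) :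
    0 ≤ PySem.Int.band a b ∧ PySem.Int.band a b ≤ a := by
  rw [PySem.Int.band_comm]; exact band_le_right b a ha

theorem fold_band_nonneg_le (l : List Int) :
    ∀ a : Int, 0 ≤ a → 0 ≤ l.foldl PySem.Int.band a ∧ l.foldl PySem.Int.band a ≤ a := by
  induction l with
  | nil => intro a ha; simp only [List.foldl_nil]; exact ⟨ha, le_rfl⟩
  | cons y t ih =>
    intro a ha
    have h1 := band_le_left a y ha
    have h2 := ih (PySem.Int.band a y) h1.1
    simp only [List.foldl_cons]
    exact ⟨h2.1, le_trans h2.2 h1.2⟩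

theorem fold_band_mem_le (l : List Int) :
    ∀ (a x : Int), x ∈ l → 0 ≤ x → 0 ≤ l.foldl PySem.Int.band a ∧ l.foldl PySem.Int.band a ≤ x := by
  induction l with
  | nil => intro a x hx; simp at hx
  | cons y t ih =>
    intro a x hx hx0
    simp only [List.foldl_cons]
    rcases List.mem_cons.mp hx with rfl | hmem
    · have h1 := band_le_right a x hx0
      have h2 := fold_band_nonneg_le t (PySem.Int.band a x) h1.1
      exact ⟨h2.1, le_trans h2.2 h1.2⟩
    · exact ih (PySem.Int.band a y) x hmem hx0

-- A's loop = fold of band over the dropped prefix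
theorem andLoopA_eq : ∀ (fuel : Nat) (xs : List Int) (acc : Int) (i : Nat),
    i < xs.length → xs.length - i ≤ fuel →
    andLoopA xs acc i fuel = (xs.drop i).foldl PySem.Int.band acc := by
  intro fuel
  induction fuel with
  | zero => intro xs acc i h1 h2; omega
  | succ fuel ih =>
    intro xs acc i h1 h2
    rw [andLoopA]
    rw [PySem.List.pyGet?_natCast]
    rw [List.getElem?_eq_getElem h1]
    simp only
    rw [List.drop_eq_getElem_cons h1, List.foldl_cons]
    by_cases hend : i + 1 = xs.length
    · simp only [if_pos hend]
      rw [hend, List.drop_length, List.foldl_nil]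
    · simp only [if_neg hend]
      exact ih xs _ (i+1) (by omega) (by omega)

theorem natBinAuxF_zero : ∀ f : Nat, natBinAuxF 0 f = [] := by
  intro f; cases f <;> simp [natBinAuxF]

theorem natBinAuxF_fuel : ∀ (fuel fuel' n : Nat), n ≤ fuel → n ≤ fuel' →
    natBinAuxF n fuel = natBinAuxF n fuel' := by
  intro fuel
  induction fuel with
  | zero => intro fuel' n h _; interval_cases n; rw [natBinAuxF_zero, natBinAuxF_zero]
  | succ fuel ih =>
    intro fuel' n h h'
    by_cases hn : n = 0
    · subst hn; rw [natBinAuxF_zero, natBinAuxF_zero]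
    · cases fuel' with
      | zero => omega
      | succ f' =>
        rw [natBinAuxF, natBinAuxF]
        simp only [if_neg hn]
        rw [ih f' (n/2) (by omega) (by omega)]

theorem natBinAux_succ (m : Nat) :
    natBinAux (m+1) = natBinAux ((m+1)/2) ++ [if (m+1) % 2 = 1 then '1' else '0'] := by
  rw [natBinAux, natBinAux, natBinAuxF]
  simp only [if_neg (Nat.succ_ne_zero m)]
  congr 1
  exact natBinAuxF_fuel m ((m+1)/2) ((m+1)/2) (by omega) le_rfl

-- length of natBinAux = bitLength
theorem natBinAux_length : ∀ n : Nat, (natBinAux n).length = PySem.Int.bitLength (n : Int) := by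
  intro n
  induction n using Nat.strong_induction_on with
  | _ n ih =>
    match n with
    | 0 => simp [natBinAux, natBinAuxF, PySem.Int.bitLength_zero]
    | m+1 =>
      rw [natBinAux_succ]
      rw [List.length_append, List.length_singleton, ih ((m+1)/2) (by omega)]
      rw [PySem.Int.bitLength_natCast (m := m+1) (by omega)]

-- bitLength is monotone on Nat casts
theorem bitLength_mono {m n : Nat} (h : m ≤ n) :
    PySem.Int.bitLength (m : Int) ≤ PySem.Int.bitLength (n : Int) := by
  by_cases hm : m = 0
  · subst hm; simp [PySem.Int.bitLength_zero]
  · have h1 := PySem.Int.two_pow_bitLength_le (m : Int) (by exact_mod_cast hm)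
    have h2 := PySem.Int.lt_two_pow_bitLength (n : Int)
    simp only [Int.natAbs_natCast] at h1 h2
    have : 2 ^ (PySem.Int.bitLength (m:Int) - 1) < 2 ^ (PySem.Int.bitLength (n:Int)) := by omega
    have := (Nat.pow_lt_pow_iff_right (by omega : 1 < 2)).mp this
    omega

-- findOffsetsA on a nonnegative haystack
theorem findOffsetsA_eq : ∀ (fuel n : Nat) (k : Int), n < fuel →
    findOffsetsA (n : Int) k fuel = (ascBits n).map (fun p : Nat => k + 1 + (p : Int)) := by
  intro fuel
  induction fuel with
  | zero => intro n k h; omega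
  | succ fuel ih =>
    intro n k h
    rw [findOffsetsA]
    match n with
    | 0 => simp [ascBits]
    | m+1 =>
      simp only [if_neg (by exact_mod_cast Nat.succ_ne_zero m : ((m+1 : Nat) : Int) ≠ 0)]
      rw [ascBits]
      have hband : PySem.Int.band ((m+1 : Nat) : Int) 1 = (((m+1) &&& 1 : Nat) : Int) := by
        exact_mod_cast PySem.Int.band_natCast (m+1) 1
      have hshift : ((m+1 : Nat) : Int) >>> (1:Nat) = (((m+1)/2 : Nat) : Int) := by
        rw [← Int.natCast_shiftRight]; norm_num [Nat.shiftRight_succ]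
      rw [hband, hshift, ih ((m+1)/2) (k+1) (by omega)]
      rw [Nat.and_one_is_mod]
      by_cases hodd : (m+1) % 2 = 1
      · simp [hodd, List.map_map]
        try constructor
        all_goals intros; first | trivial | omega
      · have h2 : (m+1) % 2 = 0 := by omega
        simp [h2, List.map_map]
        try constructor
        all_goals intros; first | trivial | omega

-- extC over appends / padding
theorem extC_append (u v : List Char) : ∀ o : Int,
    extC (u ++ v) o = extC u o ++ extC v (o + u.length) := by
  induction u with
  | nil => intro o; simp [extC]
  | cons c t ih =>
    intro o
    simp only [List.cons_append, extC, ih (o+1), List.length_cons]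
    rw [List.append_assoc]
    congr 2
    push_cast; ring_nf

theorem extC_replicate (m : Nat) : ∀ o : Int, extC (List.replicate m '0') o = [] := by
  induction m with
  | zero => intro o; simp [extC]
  | succ k ih => intro o; simp [List.replicate_succ, extC, ih]

-- extC of the binary digits, in terms of ascBits
theorem extC_natBinAux : ∀ (n : Nat) (o : Int),
    extC (natBinAux n) o
      = ((ascBits n).reverse).map (fun p : Nat => o + (PySem.Int.bitLength (n : Int) : Int) - (p : Int)) := by
  intro n
  induction n using Nat.strong_induction_on with
  | _ n ih =>
    match n with
    | 0 => intro o; simp only [natBinAux, natBinAuxF, ascBits, extC, List.reverse_nil,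
             List.map_nil]
    | m+1 =>
      intro o
      rw [natBinAux_succ, extC_append, ih ((m+1)/2) (by omega), natBinAux_length]
      rw [ascBits]
      rw [PySem.Int.bitLength_natCast (by omega : 0 < m+1)]
      by_cases hodd : (m+1) % 2 = 1
      · simp [hodd, extC, List.map_map]
        try constructor
        all_goals intros; first | trivial | omega
      · simp [hodd, extC, List.map_map]
        try constructor
        all_goals intros; first | trivial | omega

-- B's enumerate+filterMap = extC
theorem enum_filter_eq_extC (s : List Char) : ∀ o : Int,
    (PySem.List.enumerate s o).filterMap (fun p => if p.2 = '1' then some (p.1 + 1) else none)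
      = extC s o := by
  induction s with
  | nil => intro o; simp [PySem.List.enumerate, extC]
  | cons c t ih =>
    intro o
    rw [PySem.List.enumerate_cons, List.filterMap_cons, extC]
    by_cases hc : c = '1'
    · simp [hc, ih]
    · simp [hc, ih]

-- binStr of a positive Int is natBinAux of its toNat
theorem binStr_of_pos {n : Int} (h : 0 < n) : binStr n = natBinAux n.toNat := by
  rw [binStr, if_neg (by omega), if_neg (by omega)]

theorem main_core (first : Int) (rest : List Int) (x : Int) (hr : 0 < rest.length)
    (hxmem : x ∈ first :: rest) (hx0 : 0 ≤ x) :
    list_anding (first :: rest) = list_anding_alt (first :: rest) := by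
  simp only [list_anding, list_anding_alt, PySem.List.pyGet?_zero_cons]
  have hand : andLoopA (first :: rest) first 1 (first :: rest).length
      = rest.foldl PySem.Int.band first := by
    rw [andLoopA_eq (first :: rest).length (first :: rest) first 1 (by simp; omega) (by omega)]
    rfl
  rw [hand]
  set n := rest.foldl PySem.Int.band first with hn
  have hbound : 0 ≤ n ∧ n ≤ x := by
    rcases List.mem_cons.mp hxmem with rfl | hm
    · exact fold_band_nonneg_le rest x hx0
    · exact fold_band_mem_le rest first x hm hx0
  obtain ⟨hn0, hnx⟩ := hbound
  cases hmax : PySem.List.max? ((first :: rest).map (fun i => ((binStr i).length : Int))) (fun y => y) with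
  | none =>
    exact absurd ((PySem.List.max?_eq_none_iff _ _).mp hmax) (by simp)
  | some M =>
    simp only
    have hxM : ((binStr x).length : Int) ≤ M := by
      have := PySem.List.max?_isMax hmax (((binStr x).length : Int))
        (List.mem_map_of_mem hxmem)
      simpa using this
    -- A side: the generator output
    have hcast : n = ((n.toNat : Nat) : Int) := (Int.toNat_of_nonneg hn0).symm
    have hA : findOffsetsA n (-1) (n.natAbs + 1)
        = (ascBits n.toNat).map (fun p : Nat => -1 + 1 + (p : Int)) := by
      have hfa : n.natAbs = n.toNat := by omega
      rw [hfa]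
      conv_lhs => rw [hcast]
      exact findOffsetsA_eq (n.toNat + 1) n.toNat (-1) (by omega)
    rw [hA]
    -- B side: enumerate+filter = extC over the padded string
    rw [enum_filter_eq_extC, extC_append, extC_replicate, List.length_replicate, List.nil_append]
    rcases Nat.eq_zero_or_pos n.toNat with h0 | hpos
    · -- and_result = 0: both sides are empty
      have hz : n = 0 := by omega
      simp [hz, binStr, ascBits, extC]
    · -- and_result > 0
      have hnpos : 0 < n := by omega
      rw [binStr_of_pos hnpos, extC_natBinAux, natBinAux_length]
      -- the bit length of n is at most M
      have hblM : ((PySem.Int.bitLength ((n.toNat : Nat) : Int) : Nat) : Int) ≤ M := by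
        have hxpos : 0 < x := by omega
        have hxb : (binStr x).length = PySem.Int.bitLength ((x.toNat : Nat) : Int) := by
          rw [binStr_of_pos hxpos, natBinAux_length]
        have hmono := bitLength_mono (m := n.toNat) (n := x.toNat) (by omega)
        rw [hxb] at hxM
        exact le_trans (by exact_mod_cast hmono) hxM
      rw [← hcast] at hblM ⊢
      have hpad : ((M - ((PySem.Int.bitLength n : Nat) : Int)).toNat : Int)
          = M - ((PySem.Int.bitLength n : Nat) : Int) := by omega
      rw [hpad]
      rw [List.map_reverse, ← List.map_reverse, ← List.map_reverse, List.map_map]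
      exact List.map_congr_left (fun a _ => by simp only [Function.comp_apply]; omega)

-- ===== VERDICT (by name: the statement is the Claim_ definition above) =====
theorem list_anding_spec : Claim_equal_list_anding := by
  intro l _ hPre
  obtain ⟨hlen, x, hxmem, hx0⟩ := hPre
  match l, hlen, hxmem with
  | first :: rest, hlen, hxmem =>
    exact main_core first rest x (by simp at hlen ⊢; omega) hxmem hx0
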